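-- pv_equiv track=rewrite | github.com/MathieuBartels/symbolic_systems | hw1/sudoku_core.py | eliminate_kxk
-- ===== SOURCE A (Python) =====
-- def eliminate_rows(sudoku):
--     """
--         function that removes certain values from possibilities
--         in all the rows of sudoku
--     """
--     solution = []
--     for row in sudoku:
--         certain = set([item[0] for item in row if len(item)==1])
--         new_row = []
--         for item in row:
--             if len(item) ==1:
--                 new_row.append(item)
--             else:
--                 possible = list(set(item)- certain)
--                 new_row.append(possible)
--         solution.append(new_row)
--     return solution
--
-- def eliminate_kxk(sudoku, k):
--     """
--         Takes kxk blocks out of the sudoku and maps it to rows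
--         so it can be pased to eliminate rows.
--         Aftarwards its placed back
--     """
--     steps = range(len(sudoku) // k)
--     for i in steps:
--         for j in steps:
--
--             rows = sudoku[i*k:(i+1)*k]
--             part = [item[j*k:(j+1)*k] for item in rows]
--             part = [item for sublist in part for item in sublist]
--
--             cleaned_part = eliminate_rows([part])[0]
--
--             count = 0
--             for l in range(i*k, (i+1)*k):
--                 for m in range(j*k, (j+1)*k):
--                     sudoku[l][m] = sorted(cleaned_part[count])
--                     count += 1
--
--     return sudoku
-- ===== SOURCE B (Python) =====
-- def eliminate_kxk(sudoku, k):
--     """Per-block elimination done in place: collect the certain (singleton)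
--     values of each kxk block in one pass, then rewrite the block's
--     non-singleton cells as sorted(set(cell) - certain) in a second pass."""
--     blocks = range(len(sudoku) // k)
--     for i in blocks:
--         for j in blocks:
--             certain = set()
--             for l in range(i * k, (i + 1) * k):
--                 for m in range(j * k, (j + 1) * k):
--                     if len(sudoku[l][m]) == 1:
--                         certain.add(sudoku[l][m][0])
--             for l in range(i * k, (i + 1) * k):
--                 for m in range(j * k, (j + 1) * k):
--                     cell = sudoku[l][m]
--                     if len(cell) != 1:
--                         sudoku[l][m] = sorted(set(cell) - certain)
--     return sudoku
-- ===== Notes on version B (the rewrite author's own statement) =====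
-- stated objective: simpler
-- what changed: B drops the flatten-to-a-row + eliminate_rows helper + positional count-based scatter-back: it works directly on each kxk block in place with two plain passes (collect singleton values, then rewrite non-singleton cells as sorted(set(cell)-certain)).
import Mathlib
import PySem

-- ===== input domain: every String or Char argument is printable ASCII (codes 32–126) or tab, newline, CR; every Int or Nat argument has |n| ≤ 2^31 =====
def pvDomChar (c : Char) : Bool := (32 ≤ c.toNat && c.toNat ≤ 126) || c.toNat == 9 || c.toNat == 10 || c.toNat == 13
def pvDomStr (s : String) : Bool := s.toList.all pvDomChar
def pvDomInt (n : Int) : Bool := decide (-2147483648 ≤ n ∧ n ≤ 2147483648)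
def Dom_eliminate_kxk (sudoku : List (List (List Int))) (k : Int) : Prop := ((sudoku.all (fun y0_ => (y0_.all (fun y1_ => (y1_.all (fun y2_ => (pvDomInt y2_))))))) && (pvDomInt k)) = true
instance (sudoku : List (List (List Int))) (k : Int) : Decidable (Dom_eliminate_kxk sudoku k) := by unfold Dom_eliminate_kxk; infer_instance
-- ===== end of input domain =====

-- B replaces A's flatten-block-to-a-row + eliminate_rows helper + count-based scatter-back with two
-- direct in-place passes over each kxk block (collect singleton values, rewrite the other cells);
-- objective: simpler.  Both Pythons mutate `sudoku` in place identically and return it; the theorems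
-- are about the returned value.

-- ===== PORT A =====
-- Python `sudoku[l][m] = v` (shared by both ports); exact for the in-range writes the loops perform
-- (Pre_ excludes the out-of-range writes, where Python raises IndexError).
def pvSet2 (s : List (List (List Int))) (l m : Int) (v : List Int) : List (List (List Int)) :=
  s.modify l.toNat (fun row => row.set m.toNat v)

-- `item[0]` below is only evaluated on items with len(item)==1, so the defaults of pyGetD are never used.
-- `list(set(item) - certain)` is produced in PySem.Set first-insertion order instead of CPython hash
-- order; inside eliminate_kxk the value is only ever consumed through sorted(), which erases the order.
def eliminate_rows (sudoku : List (List (List Int))) : List (List (List Int)) :=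
  sudoku.foldl (fun solution row =>
    let certain : PySem.Set Int :=
      PySem.Set.ofList ((row.filter (fun item => item.length == 1)).map
        (fun item => PySem.List.pyGetD item 0 0))
    let new_row := row.foldl (fun new_row item =>
      if item.length == 1 then new_row ++ [item]
      else new_row ++ [PySem.Set.diff (PySem.Set.ofList item) certain]) []
    solution ++ [new_row]) []

-- the body of A's double block loop; `cleaned_part[count]` via pyGetD (in range under Pre_),
-- `eliminate_rows([part])[0]` via headD (eliminate_rows of a one-row list is a one-row list)
def pvBlockA (sud : List (List (List Int))) (k i j : Int) : List (List (List Int)) :=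
  let rows := PySem.List.slice sud (some (i*k)) (some ((i+1)*k))
  let part := (rows.map (fun item => PySem.List.slice item (some (j*k)) (some ((j+1)*k)))).flatten
  let cleaned_part := (eliminate_rows [part]).headD []
  ((PySem.List.pyRange (i*k) ((i+1)*k)).foldl
      (fun (st : List (List (List Int)) × Int) l =>
        (PySem.List.pyRange (j*k) ((j+1)*k)).foldl
          (fun (st : List (List (List Int)) × Int) m =>
            (pvSet2 st.1 l m (PySem.List.sorted (PySem.List.pyGetD cleaned_part st.2 []) (fun x => x)),
             st.2 + 1)) st)
      (sud, (0 : Int))).1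

def eliminate_kxk (sudoku : List (List (List Int))) (k : Int) : List (List (List Int)) :=
  let steps := PySem.List.pyRange 0 (PySem.Int.floordiv (PySem.List.len sudoku) k)
  steps.foldl (fun sud i => steps.foldl (fun sud j => pvBlockA sud k i j) sud) sudoku

-- ===== PORT B =====
-- Python `sudoku[l][m]`; exact for the in-range reads the loops perform (Pre_ excludes IndexError).
def pvGet2 (s : List (List (List Int))) (l m : Int) : List Int :=
  PySem.List.pyGetD (PySem.List.pyGetD s l []) m []

-- first pass of B's block body: certain = set of values of singleton cells of block (i,j)
def pvCertainB (sud : List (List (List Int))) (k i j : Int) : PySem.Set Int :=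
  (PySem.List.pyRange (i*k) ((i+1)*k)).foldl (fun c l =>
    (PySem.List.pyRange (j*k) ((j+1)*k)).foldl (fun c m =>
      if (pvGet2 sud l m).length == 1 then PySem.Set.add c (PySem.List.pyGetD (pvGet2 sud l m) 0 0)
      else c) c) PySem.Set.empty

-- B's block body: collect certain, then rewrite the non-singleton cells in place
def pvBlockB (sud : List (List (List Int))) (k i j : Int) : List (List (List Int)) :=
  let certain := pvCertainB sud k i j
  (PySem.List.pyRange (i*k) ((i+1)*k)).foldl (fun sud2 l =>
    (PySem.List.pyRange (j*k) ((j+1)*k)).foldl (fun sud2 m =>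
      let cell := pvGet2 sud2 l m
      if cell.length != 1 then
        pvSet2 sud2 l m (PySem.List.sorted (PySem.Set.diff (PySem.Set.ofList cell) certain) (fun x => x))
      else sud2) sud2) sud

def eliminate_kxk_alt (sudoku : List (List (List Int))) (k : Int) : List (List (List Int)) :=
  let blocks := PySem.List.pyRange 0 (PySem.Int.floordiv (PySem.List.len sudoku) k)
  blocks.foldl (fun sud i => blocks.foldl (fun sud j => pvBlockB sud k i j) sud) sudoku

-- ===== PRECONDITION & SPEC =====
-- A raises ZeroDivisionError when k = 0, and IndexError when some row inside the top-left
-- (len(sudoku)//k)*k rows is shorter than (len(sudoku)//k)*k cells (the block area the loops index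
-- into); Pre_ excludes exactly those inputs and nothing else (for k < 0 the loops run zero times).
def Pre_eliminate_kxk (sudoku : List (List (List Int))) (k : Int) : Prop :=
  k ≠ 0 ∧ (0 < k →
    ∀ row ∈ sudoku.take ((sudoku.length / k.toNat) * k.toNat),
      (sudoku.length / k.toNat) * k.toNat ≤ row.length)
instance (sudoku : List (List (List Int))) (k : Int) : Decidable (Pre_eliminate_kxk sudoku k) := by
  unfold Pre_eliminate_kxk; infer_instance

def pvWitness_eliminate_kxk : List (List (List Int)) × Int :=
  ([[[1], [1, 2]], [[2], [1, 2, 3]]], 2)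

def Spec_eliminate_kxk (sudoku : List (List (List Int))) (k : Int) (out : List (List (List Int))) : Prop :=
  out = eliminate_kxk_alt sudoku k
instance (sudoku : List (List (List Int))) (k : Int) (out : List (List (List Int))) :
    Decidable (Spec_eliminate_kxk sudoku k out) := by unfold Spec_eliminate_kxk; infer_instance

-- ===== CLAIM (what is proved, stated in full; the proofs are below) =====
def Claim_equal_eliminate_kxk : Prop := ∀ (sudoku : List (List (List Int))) (k : Int),
  Dom_eliminate_kxk sudoku k → Pre_eliminate_kxk sudoku k →
  Spec_eliminate_kxk sudoku k (eliminate_kxk sudoku k)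

-- ===== LEMMAS AND PROOFS =====

-- proof-only helpers
def pvShape (s : List (List (List Int))) : List Nat := s.map List.length
def pvCell (s : List (List (List Int))) (l m : Nat) : List Int := (s.getD l []).getD m []
-- the per-cell value A's pipeline assigns before the final sorted()
def pvG0 (certain : PySem.Set Int) (cell : List Int) : List Int :=
  if cell.length = 1 then cell else PySem.Set.diff (PySem.Set.ofList cell) certain
-- the final per-cell value both programs store
def pvG (certain : PySem.Set Int) (cell : List Int) : List Int :=
  if cell.length = 1 then cell
  else PySem.List.sorted (PySem.Set.diff (PySem.Set.ofList cell) certain) (fun x => x)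

theorem pvSet2_length (s : List (List (List Int))) (l m : Int) (v : List Int) :
    (pvSet2 s l m v).length = s.length := by simp [pvSet2]

theorem pvSet2_getElem?_ne (s : List (List (List Int))) (l m : Int) (v : List Int)
    (r : Nat) (h : r ≠ l.toNat) : (pvSet2 s l m v)[r]? = s[r]? := by
  simp [pvSet2, (Ne.symm h)]

theorem pvSet2_row (s : List (List (List Int))) (l m : Int) (v : List Int) :
    ((pvSet2 s l m v).getD l.toNat []) = (s.getD l.toNat []).set m.toNat v := by
  simp only [pvSet2, List.getD_eq_getElem?_getD, List.getElem?_modify]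
  cases s[l.toNat]? <;> simp

theorem pvShape_pvSet2 (s : List (List (List Int))) (l m : Int) (v : List Int) :
    pvShape (pvSet2 s l m v) = pvShape s := by
  apply List.ext_getElem?
  intro r
  simp only [pvShape, pvSet2, List.getElem?_map, List.getElem?_modify]
  cases s[r]? with
  | none => simp
  | some row => simp only [Option.map_some]; split <;> simp

theorem pv_sorted_G0 (certain : PySem.Set Int) (cell : List Int) :
    PySem.List.sorted (pvG0 certain cell) (fun x => x) = pvG certain cell := by
  by_cases h : cell.length = 1
  · obtain ⟨v, rfl⟩ := List.length_eq_one_iff.mp h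
    simp only [pvG0, pvG, h, if_pos]
    exact PySem.List.sorted_eq_self_of_pairwise _ _ (by simp)
  · simp [pvG0, pvG, h]

theorem pv_foldl_congr_inv {α β : Type} (P : β → Prop) (f g : β → α → β) (l : List α) (init : β)
    (h0 : P init) (hfg : ∀ s x, x ∈ l → P s → f s x = g s x)
    (hg : ∀ s x, x ∈ l → P s → P (g s x)) : l.foldl f init = l.foldl g init := by
  induction l generalizing init with
  | nil => rfl
  | cons x xs ih =>
    simp only [List.foldl_cons]
    rw [hfg init x (List.mem_cons_self ..) h0]
    exact ih _ (hg init x (List.mem_cons_self ..) h0)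
      (fun s y hy hP => hfg s y (List.mem_cons_of_mem _ hy) hP)
      (fun s y hy hP => hg s y (List.mem_cons_of_mem _ hy) hP)

theorem pv_foldl_shape {α : Type} (f : List (List (List Int)) → α → List (List (List Int)))
    (h : ∀ s x, pvShape (f s x) = pvShape s) (l : List α) (s : List (List (List Int))) :
    pvShape (l.foldl f s) = pvShape s := by
  induction l generalizing s with
  | nil => rfl
  | cons x xs ih => rw [List.foldl_cons, ih, h]

theorem pvShape_pvBlockB (s : List (List (List Int))) (k i j : Int) :
    pvShape (pvBlockB s k i j) = pvShape s := by
  unfold pvBlockB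
  refine pv_foldl_shape _ (fun s' l => ?_) _ _
  refine pv_foldl_shape _ (fun s'' m => ?_) _ _
  dsimp only
  split
  · exact pvShape_pvSet2 ..
  · rfl

theorem pv_t_nonpos (n : Nat) (k : Int) (hk : k < 0) :
    PySem.Int.floordiv (n : Int) k ≤ 0 := by
  by_contra h
  have h1 : (1 : Int) ≤ PySem.Int.floordiv (n : Int) k := by omega
  have h2 := PySem.Int.floordiv_mul_add_mod (n : Int) k
  have h3 := (PySem.Int.mod_neg_bounds (n : Int) hk).2
  have h4 : PySem.Int.floordiv (n : Int) k * k ≤ 1 * k :=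
    mul_le_mul_of_nonpos_right h1 (le_of_lt hk)
  have h5 : (0 : Int) ≤ (n : Int) := Int.natCast_nonneg n
  linarith

-- frame of B's inner (single-row) write loop: rows other than l are untouched
theorem pv_innerB_frame (certain : PySem.Set Int) (l : Int) (ms : List Int) :
    ∀ (s : List (List (List Int))) (r : Nat), r ≠ l.toNat →
      (ms.foldl (fun sud2 m =>
        let cell := pvGet2 sud2 l m
        if cell.length != 1 then
          pvSet2 sud2 l m (PySem.List.sorted (PySem.Set.diff (PySem.Set.ofList cell) certain) (fun x => x))
        else sud2) s)[r]? = s[r]? := by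
  induction ms with
  | nil => intro s r h; rfl
  | cons m ms ih =>
    intro s r h
    rw [List.foldl_cons, ih _ r h]
    dsimp only
    split
    · exact pvSet2_getElem?_ne _ _ _ _ _ h
    · rfl

theorem pv_innerB_length (certain : PySem.Set Int) (l : Int) (ms : List Int) :
    ∀ (s : List (List (List Int))),
      (ms.foldl (fun sud2 m =>
        let cell := pvGet2 sud2 l m
        if cell.length != 1 then
          pvSet2 sud2 l m (PySem.List.sorted (PySem.Set.diff (PySem.Set.ofList cell) certain) (fun x => x))
        else sud2) s).length = s.length := by
  induction ms with
  | nil => intro s; rfl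
  | cons m ms ih =>
    intro s
    rw [List.foldl_cons, ih]
    dsimp only
    split
    · exact pvSet2_length ..
    · rfl

theorem pvGet2_eq (s : List (List (List Int))) (l m : Int) (hl : 0 ≤ l) (hm : 0 ≤ m) :
    pvGet2 s l m = pvCell s l.toNat m.toNat := by
  simp [pvGet2, pvCell, PySem.List.pyGetD_of_nonneg _ _ hl, PySem.List.pyGetD_of_nonneg _ _ hm]

-- one row of the block: A's count-indexed scatter equals B's read-modify-write loop
theorem pv_inner (cleaned : List (List Int)) (certain : PySem.Set Int) (l : Int) (hl : 0 ≤ l) :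
    ∀ (κ : Nat) (b : Int) (s : List (List (List Int))) (c : Int), 0 ≤ b → 0 ≤ c →
      l.toNat < s.length →
      b.toNat + κ ≤ (s.getD l.toNat []).length →
      (∀ dm : Nat, dm < κ →
        PySem.List.sorted (PySem.List.pyGetD cleaned (c + dm) []) (fun x => x)
          = pvG certain (pvCell s l.toNat (b.toNat + dm))) →
      ((PySem.List.pyRange b (b + κ)).foldl
          (fun (st : List (List (List Int)) × Int) m =>
            (pvSet2 st.1 l m (PySem.List.sorted (PySem.List.pyGetD cleaned st.2 []) (fun x => x)),
             st.2 + 1)) (s, c))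
        = ((PySem.List.pyRange b (b + κ)).foldl
            (fun sud2 m =>
              let cell := pvGet2 sud2 l m
              if cell.length != 1 then
                pvSet2 sud2 l m (PySem.List.sorted (PySem.Set.diff (PySem.Set.ofList cell) certain) (fun x => x))
              else sud2) s, c + κ) := by
  intro κ
  induction κ with
  | zero =>
    intro b s c hb hc hls hlen hv
    rw [PySem.List.pyRange_one_eq_nil (by push_cast; omega)]
    simp
  | succ κ ih =>
    intro b s c hb hc hls hlen hv
    rw [PySem.List.pyRange_one_cons (by push_cast; omega)]
    simp only [List.foldl_cons]
    have hbn : b.toNat < (s.getD l.toNat []).length := by omega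
    have hcell : pvGet2 s l b = pvCell s l.toNat b.toNat := pvGet2_eq s l b hl hb
    have hv0 : PySem.List.sorted (PySem.List.pyGetD cleaned c []) (fun x => x)
        = pvG certain (pvCell s l.toNat b.toNat) := by
      have := hv 0 (Nat.succ_pos κ); simpa using this
    have hrange : b + ((κ + 1 : Nat) : Int) = (b + 1) + (κ : Nat) := by push_cast; ring
    by_cases hone : (pvCell s l.toNat b.toNat).length = 1
    · -- singleton cell: A rewrites it with the same value, B leaves it alone
      have hAval : PySem.List.sorted (PySem.List.pyGetD cleaned c []) (fun x => x)
          = pvCell s l.toNat b.toNat := by rw [hv0, pvG, if_pos hone]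
      have hgetl : s.getD l.toNat [] = s[l.toNat] := by
        rw [List.getD_eq_getElem?_getD, List.getElem?_eq_getElem hls, Option.getD_some]
      have hbn' : b.toNat < (s[l.toNat]).length := hgetl ▸ hbn
      have hrowE : pvCell s l.toNat b.toNat = (s[l.toNat])[b.toNat] := by
        rw [pvCell, hgetl, List.getD_eq_getElem?_getD, List.getElem?_eq_getElem hbn',
          Option.getD_some]
      have hAstate : pvSet2 s l b (pvCell s l.toNat b.toNat) = s := by
        unfold pvSet2
        rw [List.modify_eq_set]
        have hgd : s[l.toNat]?.getD default = s[l.toNat] := by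
          rw [List.getElem?_eq_getElem hls, Option.getD_some]
        rw [hgd, hrowE, List.set_getElem_self hbn', List.set_getElem_self hls]
      have hBstep : (let cell := pvGet2 s l b;
          if cell.length != 1 then
            pvSet2 s l b (PySem.List.sorted (PySem.Set.diff (PySem.Set.ofList cell) certain) (fun x => x))
          else s) = s := by
        rw [hcell]; simp [hone]
      rw [hAval, hAstate, hBstep, hrange, ih (b+1) s (c+1) (by omega) (by omega) hls
        (by omega) ?_ ]
      · simp only [Prod.mk.injEq]
        exact ⟨trivial, by push_cast; ring⟩
      · intro dm hdm
        have := hv (dm+1) (by omega)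
        have h1 : c + ((dm + 1 : Nat) : Int) = c + 1 + (dm : Nat) := by push_cast; ring
        have h2 : b.toNat + (dm + 1) = (b+1).toNat + dm := by omega
        rw [h1, h2] at this
        exact this
    · -- non-singleton cell: both write sorted(set(cell) - certain)
      have hAval : PySem.List.sorted (PySem.List.pyGetD cleaned c []) (fun x => x)
          = PySem.List.sorted (PySem.Set.diff (PySem.Set.ofList (pvCell s l.toNat b.toNat)) certain) (fun x => x) := by
        rw [hv0, pvG, if_neg hone]
      have hBstep : (let cell := pvGet2 s l b;
          if cell.length != 1 then
            pvSet2 s l b (PySem.List.sorted (PySem.Set.diff (PySem.Set.ofList cell) certain) (fun x => x))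
          else s)
          = pvSet2 s l b (PySem.List.sorted (PySem.Set.diff (PySem.Set.ofList (pvCell s l.toNat b.toNat)) certain) (fun x => x)) := by
        rw [hcell]; simp [hone]
      set v := PySem.List.sorted (PySem.Set.diff (PySem.Set.ofList (pvCell s l.toNat b.toNat)) certain) (fun x => x) with hvdef
      set s' := pvSet2 s l b v with hs'
      have hrow' : s'.getD l.toNat [] = (s.getD l.toNat []).set b.toNat v := pvSet2_row ..
      rw [hAval, hBstep, hrange, ih (b+1) s' (c+1) (by omega) (by omega)
        (by rw [hs', pvSet2_length]; exact hls)
        (by rw [hrow', List.length_set]; omega) ?_ ]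
      · simp only [Prod.mk.injEq]
        exact ⟨trivial, by push_cast; ring⟩
      · intro dm hdm
        have hcells : pvCell s' l.toNat ((b+1).toNat + dm) = pvCell s l.toNat (b.toNat + (dm+1)) := by
          have hne : b.toNat ≠ (b+1).toNat + dm := by omega
          have h2 : (b+1).toNat + dm = b.toNat + (dm+1) := by omega
          rw [pvCell, hrow', List.getD_eq_getElem?_getD, List.getElem?_set_ne hne, h2,
            ← List.getD_eq_getElem?_getD]
          rfl
        rw [hcells]
        have := hv (dm+1) (by omega)
        have h1 : c + ((dm + 1 : Nat) : Int) = c + 1 + (dm : Nat) := by push_cast; ring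
        rw [h1] at this
        exact this

-- the whole block: A's pair-state double loop equals B's double write loop
theorem pv_outer (cleaned : List (List Int)) (certain : PySem.Set Int) (b : Int) (κ : Nat)
    (hb : 0 ≤ b) :
    ∀ (ρ : Nat) (a : Int) (s : List (List (List Int))) (c : Int), 0 ≤ a → 0 ≤ c →
      a.toNat + ρ ≤ s.length →
      (∀ dl : Nat, dl < ρ → b.toNat + κ ≤ (s.getD (a.toNat + dl) []).length) →
      (∀ dl : Nat, dl < ρ → ∀ dm : Nat, dm < κ →
        PySem.List.sorted (PySem.List.pyGetD cleaned (c + (dl * κ + dm : Nat)) []) (fun x => x)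
          = pvG certain (pvCell s (a.toNat + dl) (b.toNat + dm))) →
      ((PySem.List.pyRange a (a + ρ)).foldl
          (fun (st : List (List (List Int)) × Int) l =>
            (PySem.List.pyRange b (b + κ)).foldl
              (fun (st : List (List (List Int)) × Int) m =>
                (pvSet2 st.1 l m (PySem.List.sorted (PySem.List.pyGetD cleaned st.2 []) (fun x => x)),
                 st.2 + 1)) st) (s, c))
        = ((PySem.List.pyRange a (a + ρ)).foldl
            (fun sud2 l =>
              (PySem.List.pyRange b (b + κ)).foldl
                (fun sud2 m =>
                  let cell := pvGet2 sud2 l m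
                  if cell.length != 1 then
                    pvSet2 sud2 l m (PySem.List.sorted (PySem.Set.diff (PySem.Set.ofList cell) certain) (fun x => x))
                  else sud2) sud2) s, c + (ρ * κ : Nat)) := by
  intro ρ
  induction ρ with
  | zero =>
    intro a s c ha hc hlen hrows hv
    rw [PySem.List.pyRange_one_eq_nil (a := a) (b := a + ((0 : Nat) : Int)) (by push_cast; omega)]
    simp
  | succ ρ ih =>
    intro a s c ha hc hlen hrows hv
    rw [PySem.List.pyRange_one_cons (a := a) (b := a + ((ρ + 1 : Nat) : Int)) (by push_cast; omega)]
    simp only [List.foldl_cons]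
    have hrowlen : b.toNat + κ ≤ (s.getD a.toNat []).length := by
      have := hrows 0 (Nat.succ_pos ρ); simpa using this
    have hv0 : ∀ dm : Nat, dm < κ →
        PySem.List.sorted (PySem.List.pyGetD cleaned (c + (dm : Nat)) []) (fun x => x)
          = pvG certain (pvCell s a.toNat (b.toNat + dm)) := by
      intro dm hdm
      have := hv 0 (Nat.succ_pos ρ) dm hdm
      simpa using this
    have hinner := pv_inner cleaned certain a ha κ b s c hb hc (by omega) hrowlen hv0
    rw [hinner]
    set s1 := (PySem.List.pyRange b (b + (κ : Nat))).foldl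
      (fun sud2 m =>
        let cell := pvGet2 sud2 a m
        if cell.length != 1 then
          pvSet2 sud2 a m (PySem.List.sorted (PySem.Set.diff (PySem.Set.ofList cell) certain) (fun x => x))
        else sud2) s with hs1
    have hs1len : s1.length = s.length := pv_innerB_length certain a _ s
    have hs1get : ∀ r : Nat, r ≠ a.toNat → s1.getD r [] = s.getD r [] := by
      intro r hr
      rw [List.getD_eq_getElem?_getD, pv_innerB_frame certain a _ s r hr,
        ← List.getD_eq_getElem?_getD]
    have hrange : a + ((ρ + 1 : Nat) : Int) = (a + 1) + (ρ : Nat) := by push_cast; ring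
    rw [hrange, ih (a+1) s1 (c + (κ : Nat)) (by omega) (by omega) ?_ ?_ ?_]
    · simp only [Prod.mk.injEq]
      exact ⟨trivial, by push_cast; ring⟩
    · rw [hs1len]; omega
    · intro dl hdl
      have hne : (a+1).toNat + dl ≠ a.toNat := by omega
      rw [hs1get _ hne]
      have h2 : (a+1).toNat + dl = a.toNat + (dl + 1) := by omega
      rw [h2]
      exact hrows (dl+1) (by omega)
    · intro dl hdl dm hdm
      have hne : (a+1).toNat + dl ≠ a.toNat := by omega
      have hcells : pvCell s1 ((a+1).toNat + dl) (b.toNat + dm)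
          = pvCell s (a.toNat + (dl+1)) (b.toNat + dm) := by
        rw [pvCell, pvCell, hs1get _ hne]
        congr 2
        omega
      rw [hcells]
      have := hv (dl+1) (by omega) dm hdm
      have h1 : c + (((dl+1) * κ + dm : Nat) : Int)
          = c + (κ : Nat) + ((dl * κ + dm : Nat) : Int) := by push_cast; ring
      rw [h1] at this
      exact this

theorem pv_drop_take_map {α : Type} (xs : List α) (d0 : α) (p κ : Nat) (h : p + κ ≤ xs.length) :
    (xs.drop p).take κ = (List.range κ).map (fun d => xs.getD (p + d) d0) := by
  apply List.ext_getElem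
  · simp; omega
  · intro i h1 h2
    have hi : i < κ := by simpa using h2
    have hpi : p + i < xs.length := by omega
    simp [List.getElem_take, List.getElem_drop, List.getD_eq_getElem?_getD,
      List.getElem?_eq_getElem hpi]

theorem pv_flatten_getD (κ : Nat) :
    ∀ (parts : List (List (List Int))) (q r : Nat), (∀ p ∈ parts, p.length = κ) →
      q < parts.length → r < κ →
      parts.flatten.getD (q * κ + r) [] = (parts.getD q []).getD r [] := by
  intro parts
  induction parts with
  | nil => intro q r _ hq _; simp at hq
  | cons x xs ih =>
    intro q r hlen hq hr
    cases q with
    | zero =>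
      have hx : r < x.length := by rw [hlen x (List.mem_cons_self ..)]; omega
      simp only [List.flatten_cons, Nat.zero_mul, Nat.zero_add, List.getD_eq_getElem?_getD,
        List.getElem?_append_left hx]
      simp
    | succ q =>
      have hx : x.length = κ := hlen x (List.mem_cons_self ..)
      have hge : x.length ≤ (q + 1) * κ + r := by rw [hx]; nlinarith
      rw [List.flatten_cons, List.getD_eq_getElem?_getD, List.getElem?_append_right hge,
        ← List.getD_eq_getElem?_getD]
      have hidx : (q + 1) * κ + r - x.length = q * κ + r := by rw [hx]; ring_nf; omega
      rw [hidx, List.getD_cons_succ]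
      exact ih q r (fun p hp => hlen p (List.mem_cons_of_mem _ hp)) (by simpa using hq) hr

theorem pv_foldl_two_append (certain : PySem.Set Int) :
    ∀ (l acc : List (List Int)),
      l.foldl (fun new_row item =>
        if item.length == 1 then new_row ++ [item]
        else new_row ++ [PySem.Set.diff (PySem.Set.ofList item) certain]) acc
      = acc ++ l.map (pvG0 certain) := by
  intro l
  induction l with
  | nil => intro acc; simp
  | cons x xs ih =>
    intro acc
    rw [List.foldl_cons, ih]
    by_cases h : x.length = 1 <;> simp [pvG0, h]

theorem pv_fold_add_filter :
    ∀ (L : List (List Int)) (c0 : PySem.Set Int),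
      L.foldl (fun c x =>
        if x.length == 1 then PySem.Set.add c (PySem.List.pyGetD x 0 0) else c) c0
      = ((L.filter (fun item => item.length == 1)).map
          (fun item => PySem.List.pyGetD item 0 0)).foldl PySem.Set.add c0 := by
  intro L
  induction L with
  | nil => intro c0; rfl
  | cons x xs ih =>
    intro c0
    rw [List.foldl_cons, ih]
    by_cases h : x.length = 1 <;> simp [h]

theorem pv_block (sudoku : List (List (List Int))) (k i j : Int) (s : List (List (List Int)))
    (hpre : Pre_eliminate_kxk sudoku k) (hshape : pvShape s = pvShape sudoku)
    (hi0 : 0 ≤ i) (hit : i < PySem.Int.floordiv (PySem.List.len sudoku) k)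
    (hj0 : 0 ≤ j) (hjt : j < PySem.Int.floordiv (PySem.List.len sudoku) k) :
    pvBlockA s k i j = pvBlockB s k i j := by
  obtain ⟨hk0, hkp⟩ := hpre
  have hn : PySem.List.len sudoku = (sudoku.length : Int) := PySem.List.len_eq _
  rw [hn] at hit hjt
  have hkpos : 0 < k := by
    rcases lt_trichotomy k 0 with h | h | h
    · exfalso; have := pv_t_nonpos sudoku.length k h; omega
    · exact absurd h hk0
    · exact h
  have hkκ : k = (k.toNat : Int) := by omega
  have ht : PySem.Int.floordiv (sudoku.length : Int) k
      = ((sudoku.length / k.toNat : Nat) : Int) := by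
    rw [hkκ]; exact_mod_cast PySem.Int.floordiv_natCast sudoku.length k.toNat
  rw [ht] at hit hjt
  -- Nat bookkeeping
  set κ := k.toNat with hκdef
  set n := sudoku.length with hndef
  set iN := i.toNat with hiNdef
  set jN := j.toNat with hjNdef
  have hiN : iN < n / κ := by omega
  have hjN : jN < n / κ := by omega
  set aN := iN * κ with haNdef
  set bN := jN * κ with hbNdef
  set w := (n / κ) * κ with hwdef
  have hwn : w ≤ n := Nat.div_mul_le_self n κ
  have haw : aN + κ ≤ w := by
    calc aN + κ = (iN + 1) * κ := by ring
    _ ≤ (n / κ) * κ := Nat.mul_le_mul_right κ hiN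
  have hbw : bN + κ ≤ w := by
    calc bN + κ = (jN + 1) * κ := by ring
    _ ≤ (n / κ) * κ := Nat.mul_le_mul_right κ hjN
  have hslen : s.length = n := by
    have := congrArg List.length hshape
    simpa [pvShape] using this
  have hsrow : ∀ idx : Nat, idx < n → (s.getD idx []).length = (sudoku.getD idx []).length := by
    intro idx h
    have hx := congrArg (fun L => L[idx]?) hshape
    have hsn : idx < s.length := by omega
    simp only [pvShape, List.getElem?_map, List.getElem?_eq_getElem hsn,
      List.getElem?_eq_getElem (show idx < sudoku.length from h), Option.map_some] at hx
    have h1 : s.getD idx [] = s[idx] := by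
      rw [List.getD_eq_getElem?_getD, List.getElem?_eq_getElem hsn, Option.getD_some]
    have h2 : sudoku.getD idx [] = sudoku[idx] := by
      rw [List.getD_eq_getElem?_getD, List.getElem?_eq_getElem
        (show idx < sudoku.length from h), Option.getD_some]
    rw [h1, h2]
    exact Option.some.inj hx
  have hrowlen : ∀ idx : Nat, idx < w → w ≤ (s.getD idx []).length := by
    intro idx h
    have hidx : idx < n := by omega
    have h2 : sudoku.getD idx [] = sudoku[idx] := by
      rw [List.getD_eq_getElem?_getD, List.getElem?_eq_getElem hidx, Option.getD_some]
    have htk : idx < (sudoku.take w).length := by simp; omega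
    have hmem : sudoku[idx] ∈ sudoku.take w := by
      have := List.getElem_mem htk
      rwa [List.getElem_take] at this
    have := hkp hkpos sudoku[idx] hmem
    rw [hsrow idx hidx, h2]
    exact this
  -- the Int endpoints of the loops, as Nat casts
  have hik : i * k = ((aN : Nat) : Int) := by
    have hi' : i = (iN : Int) := by omega
    rw [hi', hkκ, haNdef]; push_cast; ring
  have hik1 : (i + 1) * k = ((aN : Nat) : Int) + ((κ : Nat) : Int) := by
    have hi' : i = (iN : Int) := by omega
    rw [hi', hkκ, haNdef]; push_cast; ring
  have hjk : j * k = ((bN : Nat) : Int) := by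
    have hj' : j = (jN : Int) := by omega
    rw [hj', hkκ, hbNdef]; push_cast; ring
  have hjk1 : (j + 1) * k = ((bN : Nat) : Int) + ((κ : Nat) : Int) := by
    have hj' : j = (jN : Int) := by omega
    rw [hj', hkκ, hbNdef]; push_cast; ring
  -- the block, read cell by cell from the state s
  have hrowslice : ∀ dl : Nat, dl < κ →
      PySem.List.slice (s.getD (aN + dl) []) (some ((bN : Nat) : Int))
        (some (((bN : Nat) : Int) + ((κ : Nat) : Int)))
      = (List.range κ).map (fun dm => pvCell s (aN + dl) (bN + dm)) := by
    intro dl hdl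
    rw [PySem.List.slice_toNat _ (by positivity) (by positivity)]
    rw [show (((bN : Nat) : Int) + ((κ : Nat) : Int)).toNat - ((bN : Nat) : Int).toNat = κ
      from by omega, show ((bN : Nat) : Int).toNat = bN from by omega]
    rw [pv_drop_take_map _ [] bN κ (by have := hrowlen (aN + dl) (by omega); omega)]
    simp only [pvCell]
  have hrows_eq : PySem.List.slice s (some ((aN : Nat) : Int))
      (some (((aN : Nat) : Int) + ((κ : Nat) : Int)))
      = (List.range κ).map (fun dl => s.getD (aN + dl) []) := by
    rw [PySem.List.slice_toNat _ (by positivity) (by positivity)]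
    rw [show (((aN : Nat) : Int) + ((κ : Nat) : Int)).toNat - ((aN : Nat) : Int).toNat = κ
      from by omega, show ((aN : Nat) : Int).toNat = aN from by omega]
    exact pv_drop_take_map _ [] aN κ (by omega)
  have hpart : ((PySem.List.slice s (some ((aN : Nat) : Int))
        (some (((aN : Nat) : Int) + ((κ : Nat) : Int)))).map
        (fun item => PySem.List.slice item (some ((bN : Nat) : Int))
          (some (((bN : Nat) : Int) + ((κ : Nat) : Int))))).flatten
      = ((List.range κ).map (fun dl =>
          (List.range κ).map (fun dm => pvCell s (aN + dl) (bN + dm)))).flatten := by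
    rw [hrows_eq, List.map_map]
    congr 1
    apply List.map_congr_left
    intro dl hdl
    exact hrowslice dl (List.mem_range.mp hdl)
  -- C is the block as a flat row-major list of cells
  set C : List (List Int) := ((List.range κ).map (fun dl =>
      (List.range κ).map (fun dm => pvCell s (aN + dl) (bN + dm)))).flatten with hCdef
  have hClen : C.length = κ * κ := by
    simp [hCdef, List.length_flatten, List.map_map, Function.comp_def,
      List.map_const', List.sum_replicate, smul_eq_mul]
  have hCget : ∀ dl : Nat, dl < κ → ∀ dm : Nat, dm < κ →
      C.getD (dl * κ + dm) [] = pvCell s (aN + dl) (bN + dm) := by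
    intro dl hdl dm hdm
    rw [hCdef, pv_flatten_getD κ _ dl dm ?_ (by simpa using hdl) hdm]
    · have h1 : ((List.range κ).map (fun dl =>
          (List.range κ).map (fun dm => pvCell s (aN + dl) (bN + dm)))).getD dl []
          = (List.range κ).map (fun dm => pvCell s (aN + dl) (bN + dm)) := by
        rw [List.getD_eq_getElem?_getD, List.getElem?_map, List.getElem?_range hdl]
        rfl
      rw [h1, List.getD_eq_getElem?_getD, List.getElem?_map, List.getElem?_range hdm]
      rfl
    · intro p hp
      obtain ⟨dl', _, rfl⟩ := List.mem_map.mp hp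
      simp
  set certainA : PySem.Set Int := PySem.Set.ofList ((C.filter
      (fun item => item.length == 1)).map (fun item => PySem.List.pyGetD item 0 0)) with hcertA
  have hclean : (eliminate_rows [C]).headD [] = C.map (pvG0 certainA) := by
    unfold eliminate_rows
    simp only [List.foldl_cons, List.foldl_nil, List.nil_append]
    rw [pv_foldl_two_append, List.nil_append]
    simp
    intro a _
    rw [hcertA]
  have hCfold : certainA = C.foldl (fun c x =>
      if x.length == 1 then PySem.Set.add c (PySem.List.pyGetD x 0 0) else c) PySem.Set.empty := by
    rw [hcertA, PySem.Set.ofList_eq_foldl, ← pv_fold_add_filter]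
    rfl
  have hcertain : pvCertainB s k i j = certainA := by
    unfold pvCertainB
    rw [hik, hik1, hjk, hjk1]
    rw [PySem.List.pyRange_one ((aN : Nat) : Int) (((aN : Nat) : Int) + ((κ : Nat) : Int)),
      PySem.List.pyRange_one ((bN : Nat) : Int) (((bN : Nat) : Int) + ((κ : Nat) : Int))]
    rw [show ((((aN : Nat) : Int) + ((κ : Nat) : Int)) - ((aN : Nat) : Int)).toNat = κ
      from by omega, show ((((bN : Nat) : Int) + ((κ : Nat) : Int)) - ((bN : Nat) : Int)).toNat = κ
      from by omega]
    simp only [List.foldl_map]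
    have hcells : ∀ dl dm : Nat,
        pvGet2 s (((aN : Nat) : Int) + ((dl : Nat) : Int)) (((bN : Nat) : Int) + ((dm : Nat) : Int))
          = pvCell s (aN + dl) (bN + dm) := by
      intro dl dm
      rw [pvGet2_eq _ _ _ (by positivity) (by positivity)]
      congr 1
    simp only [hcells]
    rw [hCfold, hCdef, List.foldl_flatten]
    simp only [List.foldl_map]
  -- now rewrite both block bodies and apply pv_outer
  unfold pvBlockA pvBlockB
  dsimp only
  rw [hcertain, hik, hik1, hjk, hjk1, hpart, hclean]
  have houter := pv_outer (C.map (pvG0 certainA)) certainA ((bN : Nat) : Int) κ (by positivity)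
    κ ((aN : Nat) : Int) s 0 (by positivity) le_rfl ?_ ?_ ?_
  · rw [houter]
  · rw [show ((aN : Nat) : Int).toNat = aN from by omega]; omega
  · intro dl hdl
    rw [show ((aN : Nat) : Int).toNat = aN from by omega,
      show ((bN : Nat) : Int).toNat = bN from by omega]
    have := hrowlen (aN + dl) (by omega)
    omega
  · intro dl hdl dm hdm
    rw [show ((aN : Nat) : Int).toNat = aN from by omega,
      show ((bN : Nat) : Int).toNat = bN from by omega]
    have hidx : dl * κ + dm < C.length := by
      rw [hClen]
      calc dl * κ + dm < dl * κ + κ := by omega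
      _ = (dl + 1) * κ := by ring
      _ ≤ κ * κ := Nat.mul_le_mul_right κ (by omega)
    have hg1 : PySem.List.pyGetD (C.map (pvG0 certainA)) (0 + ((dl * κ + dm : Nat) : Int)) []
        = pvG0 certainA (C.getD (dl * κ + dm) []) := by
      rw [PySem.List.pyGetD_of_nonneg _ _ (by positivity),
        show ((0 : Int) + ((dl * κ + dm : Nat) : Int)).toNat = dl * κ + dm from by omega]
      rw [List.getD_eq_getElem?_getD, List.getElem?_map,
        List.getElem?_eq_getElem hidx, Option.map_some, Option.getD_some,
        List.getD_eq_getElem?_getD, List.getElem?_eq_getElem hidx, Option.getD_some]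
    rw [hg1, hCget dl hdl dm hdm, pv_sorted_G0]

-- ===== VERDICT (by name: the statement is the Claim_ definition above) =====
theorem eliminate_kxk_spec : Claim_equal_eliminate_kxk := by
  intro sudoku k _hdom hpre
  unfold Spec_eliminate_kxk eliminate_kxk eliminate_kxk_alt
  dsimp only
  apply pv_foldl_congr_inv (P := fun s => pvShape s = pvShape sudoku)
  · rfl
  · intro s i hi hP
    apply pv_foldl_congr_inv (P := fun s => pvShape s = pvShape sudoku)
    · exact hP
    · intro s' j hj hP'
      have hi' := PySem.List.mem_pyRange_one.mp hi
      have hj' := PySem.List.mem_pyRange_one.mp hj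
      exact pv_block sudoku k i j s' hpre hP' hi'.1 hi'.2 hj'.1 hj'.2
    · intro s' j _hj hP'
      rw [pvShape_pvBlockB]; exact hP'
  · intro s i _hi hP
    rw [pv_foldl_shape _ (fun s' j => pvShape_pvBlockB s' k i j) _ s]
    exact hP
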